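-- pv_equiv track=rewrite | github.com/S-S-Q/comfyui-skill | services/comfyui_client.py | _generate_download_guide
-- ===== SOURCE A (Python) =====
-- from typing import Optional, Dict, Any, List, Tuple
--
-- def _generate_download_guide(missing: List[Dict[str, str]]) -> Dict[str, List[str]]:
--     """生成下载指南"""
--     guide = {}
--     for item in missing:
--         model_type = item["type"]
--         model_name = item["model"]
--         if model_type not in guide:
--             guide[model_type] = []
--         guide[model_type].append(model_name)
--     return guide
-- ===== SOURCE B (Python) =====
-- def _generate_download_guide(missing):
--     """生成下载指南"""
--     types = list(dict.fromkeys(item["type"] for item in missing))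
--     return {t: [item["model"] for item in missing if item["type"] == t] for t in types}
-- ===== Notes on version B (the rewrite author's own statement) =====
-- stated objective: alternative
-- what changed: B replaces A's incremental dict-of-lists accumulation with a two-phase pass: collect the distinct types in first-occurrence order via dict.fromkeys, then build each type's model list with a filtering comprehension over the whole input.
import Mathlib
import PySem

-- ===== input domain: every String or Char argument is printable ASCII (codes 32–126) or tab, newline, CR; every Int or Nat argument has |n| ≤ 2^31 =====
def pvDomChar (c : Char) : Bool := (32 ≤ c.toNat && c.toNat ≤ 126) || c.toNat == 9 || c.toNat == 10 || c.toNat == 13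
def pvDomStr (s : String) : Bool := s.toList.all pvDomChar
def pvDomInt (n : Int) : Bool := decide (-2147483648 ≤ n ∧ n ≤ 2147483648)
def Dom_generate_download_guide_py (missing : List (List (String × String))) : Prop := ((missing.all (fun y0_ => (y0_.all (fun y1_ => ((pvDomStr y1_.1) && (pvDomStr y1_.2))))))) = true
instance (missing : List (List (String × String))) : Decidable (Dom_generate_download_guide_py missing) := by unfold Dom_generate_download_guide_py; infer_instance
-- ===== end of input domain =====

-- B groups by collecting the distinct types first and filtering the input per type,
-- instead of A's incremental dict-of-lists accumulation (objective: alternative decomposition).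

-- shared helpers: item["type"] / item["model"] (first-match dict lookup; the "" default is
-- never reached on inputs satisfying Pre_, which requires both keys to be present)
def pvKey (it : List (String × String)) : String := (PySem.Dict.mk it).getD "type" ""
def pvVal (it : List (String × String)) : String := (PySem.Dict.mk it).getD "model" ""

-- ===== PORT A =====
def generate_download_guide_py (missing : List (List (String × String))) : List (String × List String) :=
  (missing.foldl
    (fun guide item =>
      let t := pvKey item
      let m := pvVal item
      let guide := if guide.contains t = false then guide.insert t [] else guide
      guide.modify t [] (fun l => l ++ [m]))
    PySem.Dict.empty).items

-- ===== PORT B =====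
def generate_download_guide_py_alt (missing : List (List (String × String))) : List (String × List String) :=
  let types := PySem.List.dedup (missing.map pvKey)
  types.map (fun t => (t, (missing.filter (fun it => pvKey it == t)).map pvVal))

-- ===== PRECONDITION & SPEC =====
-- Pre_ excludes exactly the items lacking a "type" or "model" key, on which Python A raises KeyError.
def Pre_generate_download_guide_py (missing : List (List (String × String))) : Prop :=
  ∀ it ∈ missing, (PySem.Dict.mk it).contains "type" = true ∧ (PySem.Dict.mk it).contains "model" = true
instance (missing : List (List (String × String))) : Decidable (Pre_generate_download_guide_py missing) := by unfold Pre_generate_download_guide_py; infer_instance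

def pvWitness_generate_download_guide_py : (List (List (String × String))) :=
  [[("type", "checkpoint"), ("model", "sd15.safetensors")],
   [("type", "lora"), ("model", "style.safetensors")],
   [("type", "checkpoint"), ("model", "sdxl.safetensors")]]

def Spec_generate_download_guide_py (missing : List (List (String × String))) (out : List (String × List String)) : Prop := out = generate_download_guide_py_alt missing
instance (missing : List (List (String × String))) (out : List (String × List String)) : Decidable (Spec_generate_download_guide_py missing out) := by unfold Spec_generate_download_guide_py; infer_instance

-- ===== CLAIM (what is proved, stated in full; the proofs are below) =====
def Claim_equal_generate_download_guide_py : Prop := ∀ (missing : List (List (String × String))), Dom_generate_download_guide_py missing → Pre_generate_download_guide_py missing → Spec_generate_download_guide_py missing (generate_download_guide_py missing)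

-- ===== LEMMAS AND PROOFS =====
-- A's "if absent, insert []" followed by append-modify is one modify with default []
theorem pv_step_eq (g : PySem.Dict String (List String)) (t : String) (m : String) :
    (if g.contains t = false then g.insert t [] else g).modify t [] (fun l => l ++ [m])
      = g.modify t [] (fun l => l ++ [m]) := by
  by_cases h : g.contains t
  · simp [h]
  · simp only [Bool.not_eq_true] at h
    simp only [h]
    simp [PySem.Dict.modify, PySem.Dict.getD_insert_self,
          PySem.Dict.getD_of_not_contains (h := h), PySem.Dict.insert_insert_self]

-- ===== VERDICT (by name: the statement is the Claim_ definition above) =====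
theorem generate_download_guide_py_spec : Claim_equal_generate_download_guide_py := by
  intro missing _ _
  unfold Spec_generate_download_guide_py generate_download_guide_py generate_download_guide_py_alt
  have hfe : (fun (guide : PySem.Dict String (List String)) item =>
        (if guide.contains (pvKey item) = false then guide.insert (pvKey item) [] else guide).modify
          (pvKey item) [] (fun l => l ++ [pvVal item]))
      = (fun guide item => guide.modify (pvKey item) [] (fun l => l ++ [pvVal item])) := by
    funext g it; exact pv_step_eq g _ _
  show (missing.foldl _ PySem.Dict.empty).items = _
  rw [hfe]
  set d := missing.foldl (fun guide item => guide.modify (pvKey item) [] (fun l => l ++ [pvVal item])) PySem.Dict.empty with hd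
  have hnd : d.keys.Nodup :=
    PySem.Dict.nodup_keys_foldl_modify_key missing pvKey [] (fun g it l => l ++ [pvVal it]) _ (by simp)
  have hkeys : d.keys = PySem.Set.ofList (missing.map pvKey) := by
    rw [hd, PySem.Dict.keys_foldl_modify_key]
    simp [PySem.Dict.keys_empty, PySem.Set.update_nil_left]
  have hget : ∀ t, d.getD t [] = (missing.filter (fun it => pvKey it == t)).map pvVal := by
    intro t
    have := PySem.Dict.getD_foldl_modify_append (l := missing.map (fun it => (pvKey it, pvVal it)))
        (d := (PySem.Dict.empty : PySem.Dict String (List String))) (c := t)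
    rw [List.foldl_map] at this
    simpa [List.filter_map, List.map_map, Function.comp] using this
  rw [PySem.Dict.items_eq_map_keys d hnd [], hkeys, PySem.List.dedup_eq_ofList]
  apply List.map_congr_left
  intro t ht
  simp [hget t]
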